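-- pv_equiv track=rewrite | github.com/cesarolivermejia789-source/semana-2 | LaboratorioSemana10/ejercicio8.py | transformar_varias_veces
-- ===== SOURCE A (Python) =====
-- def transformar_varias_veces(texto, lista_numeros):
--     resultado = texto
--
--     for numero in lista_numeros:
--         if numero == 1:
--             resultado = resultado.upper()
--         elif numero == 2:
--             resultado = resultado.lower()
--         elif numero == 3:
--             resultado = resultado.capitalize()
--         else:
--             return "Opción inválida"
--
--     return resultado
-- ===== SOURCE B (Python) =====
-- def transformar_varias_veces(texto, lista_numeros):
--     # Only the last transformation matters: upper/lower/capitalize each fully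
--     # determine the result independently of the previous case of the string.
--     if all(n == 1 or n == 2 or n == 3 for n in lista_numeros):
--         if not lista_numeros:
--             return texto
--         ultimo = lista_numeros[-1]
--         if ultimo == 1:
--             return texto.upper()
--         elif ultimo == 2:
--             return texto.lower()
--         else:
--             return texto.capitalize()
--     else:
--         return "Opción inválida"
-- ===== Notes on version B (the rewrite author's own statement) =====
-- stated objective: alternative
-- what changed: Instead of applying every transformation in sequence, B validates the whole list in one pass and applies only the LAST transformation, since upper/lower/capitalize each determine the result independently of the string's prior case.
import Mathlib
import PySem

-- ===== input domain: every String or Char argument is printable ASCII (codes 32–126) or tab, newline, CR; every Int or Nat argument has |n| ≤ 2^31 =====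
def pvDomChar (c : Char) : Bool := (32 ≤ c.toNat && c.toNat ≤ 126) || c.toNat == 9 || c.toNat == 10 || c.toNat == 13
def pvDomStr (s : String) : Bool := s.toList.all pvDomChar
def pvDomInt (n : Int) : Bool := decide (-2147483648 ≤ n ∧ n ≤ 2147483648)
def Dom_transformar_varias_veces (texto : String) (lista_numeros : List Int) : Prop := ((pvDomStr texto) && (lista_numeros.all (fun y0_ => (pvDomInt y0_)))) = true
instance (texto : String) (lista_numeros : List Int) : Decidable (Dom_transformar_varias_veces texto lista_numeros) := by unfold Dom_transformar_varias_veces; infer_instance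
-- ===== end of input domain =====

-- B applies only the last transformation after one validation pass: upper/lower/capitalize
-- each determine the result regardless of the string's prior case.


-- ===== PORT A =====
-- str.capitalize() has no PySem primitive; hand port, exact on the ASCII domain:
-- first char uppercased, the rest lowered.
def pyCap (cs : List Char) : List Char :=
  match cs with
  | [] => []
  | c :: r => PySem.Chars.upperChar c :: PySem.Chars.lower r

def pyCapStr (s : String) : String := String.ofList (pyCap s.toList)

-- the for-loop of A, with the early return on an invalid number
def tvvLoop (resultado : String) : List Int → String
  | [] => resultado
  | numero :: rest =>
    if numero = 1 then tvvLoop (PySem.Str.upper resultado) rest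
    else if numero = 2 then tvvLoop (PySem.Str.lower resultado) rest
    else if numero = 3 then tvvLoop (pyCapStr resultado) rest
    else "Opción inválida"

def transformar_varias_veces (texto : String) (lista_numeros : List Int) : String :=
  tvvLoop texto lista_numeros

-- ===== PORT B =====
def tvvApply (n : Int) (s : String) : String :=
  if n = 1 then PySem.Str.upper s
  else if n = 2 then PySem.Str.lower s
  else pyCapStr s

def transformar_varias_veces_alt (texto : String) (lista_numeros : List Int) : String :=
  if lista_numeros.all (fun n => n == 1 || n == 2 || n == 3) then
    match lista_numeros.getLast? with
    | none => texto
    | some ultimo => tvvApply ultimo texto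
  else "Opción inválida"

-- ===== PRECONDITION & SPEC =====
def Spec_transformar_varias_veces (texto : String) (lista_numeros : List Int) (out : String) : Prop := out = transformar_varias_veces_alt texto lista_numeros
instance (texto : String) (lista_numeros : List Int) (out : String) : Decidable (Spec_transformar_varias_veces texto lista_numeros out) := by unfold Spec_transformar_varias_veces; infer_instance

-- ===== CLAIM (what is proved, stated in full; the proofs are below) =====
def Claim_equal_transformar_varias_veces : Prop := ∀ (texto : String) (lista_numeros : List Int), Dom_transformar_varias_veces texto lista_numeros → Spec_transformar_varias_veces texto lista_numeros (transformar_varias_veces texto lista_numeros)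

-- ===== LEMMAS AND PROOFS =====

theorem pvToNat_ofNat (n : Nat) (h : n < 55296) : (Char.ofNat n).toNat = n := by
  rw [Char.toNat_ofNat, if_pos (Or.inl h)]

theorem pvLe_char (a b : Char) : (a ≤ b) ↔ a.toNat ≤ b.toNat := by
  rw [Char.le_def, UInt32.le_iff_toNat_le]; exact Iff.rfl

theorem pvUpper_lower (c : Char) :
    PySem.Chars.upperChar (PySem.Chars.lowerChar c) = PySem.Chars.upperChar c := by
  unfold PySem.Chars.upperChar PySem.Chars.lowerChar PySem.Chars.islower PySem.Chars.isupper
  simp only [pvLe_char, decide_eq_true_eq, Bool.and_eq_true,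
    show ('A').toNat = 65 from rfl, show ('Z').toNat = 90 from rfl,
    show ('a').toNat = 97 from rfl, show ('z').toNat = 122 from rfl]
  by_cases h : 65 ≤ c.toNat ∧ c.toNat ≤ 90
  · have h1 : (Char.ofNat (c.toNat + 32)).toNat = c.toNat + 32 := pvToNat_ofNat _ (by omega)
    rw [if_pos h, h1, if_pos (by omega), if_neg (by omega), Nat.add_sub_cancel, Char.ofNat_toNat]
  · rw [if_neg h]

theorem pvLower_upper (c : Char) :
    PySem.Chars.lowerChar (PySem.Chars.upperChar c) = PySem.Chars.lowerChar c := by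
  unfold PySem.Chars.upperChar PySem.Chars.lowerChar PySem.Chars.islower PySem.Chars.isupper
  simp only [pvLe_char, decide_eq_true_eq, Bool.and_eq_true,
    show ('A').toNat = 65 from rfl, show ('Z').toNat = 90 from rfl,
    show ('a').toNat = 97 from rfl, show ('z').toNat = 122 from rfl]
  by_cases h : 97 ≤ c.toNat ∧ c.toNat ≤ 122
  · have h1 : (Char.ofNat (c.toNat - 32)).toNat = c.toNat - 32 := pvToNat_ofNat _ (by omega)
    rw [if_pos h, h1, if_pos (by omega), if_neg (by omega)]
    rw [show c.toNat - 32 + 32 = c.toNat by omega, Char.ofNat_toNat]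
  · rw [if_neg h]

theorem pvUpper_upper (c : Char) :
    PySem.Chars.upperChar (PySem.Chars.upperChar c) = PySem.Chars.upperChar c := by
  unfold PySem.Chars.upperChar PySem.Chars.islower
  simp only [pvLe_char, decide_eq_true_eq, Bool.and_eq_true,
    show ('a').toNat = 97 from rfl, show ('z').toNat = 122 from rfl]
  by_cases h : 97 ≤ c.toNat ∧ c.toNat ≤ 122
  · have h1 : (Char.ofNat (c.toNat - 32)).toNat = c.toNat - 32 := pvToNat_ofNat _ (by omega)
    rw [if_pos h, if_neg (by rw [h1]; omega)]
  · rw [if_neg h, if_neg h]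

theorem pvLower_lower (c : Char) :
    PySem.Chars.lowerChar (PySem.Chars.lowerChar c) = PySem.Chars.lowerChar c := by
  unfold PySem.Chars.lowerChar PySem.Chars.isupper
  simp only [pvLe_char, decide_eq_true_eq, Bool.and_eq_true,
    show ('A').toNat = 65 from rfl, show ('Z').toNat = 90 from rfl]
  by_cases h : 65 ≤ c.toNat ∧ c.toNat ≤ 90
  · have h1 : (Char.ofNat (c.toNat + 32)).toNat = c.toNat + 32 := pvToNat_ofNat _ (by omega)
    rw [if_pos h, if_neg (by rw [h1]; omega)]
  · rw [if_neg h, if_neg h]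

-- list-level: each transform composed with any other equals the outer one
theorem pvUpperL_lowerL (cs : List Char) :
    PySem.Chars.upper (PySem.Chars.lower cs) = PySem.Chars.upper cs := by
  simp [PySem.Chars.upper, PySem.Chars.lower, List.map_map, Function.comp, pvUpper_lower]

theorem pvLowerL_upperL (cs : List Char) :
    PySem.Chars.lower (PySem.Chars.upper cs) = PySem.Chars.lower cs := by
  simp [PySem.Chars.upper, PySem.Chars.lower, List.map_map, Function.comp, pvLower_upper]

theorem pvUpperL_upperL (cs : List Char) :
    PySem.Chars.upper (PySem.Chars.upper cs) = PySem.Chars.upper cs := by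
  simp [PySem.Chars.upper, List.map_map, Function.comp, pvUpper_upper]

theorem pvLowerL_lowerL (cs : List Char) :
    PySem.Chars.lower (PySem.Chars.lower cs) = PySem.Chars.lower cs := by
  simp [PySem.Chars.lower, List.map_map, Function.comp, pvLower_lower]

theorem pvUpperL_cap (cs : List Char) :
    PySem.Chars.upper (pyCap cs) = PySem.Chars.upper cs := by
  cases cs with
  | nil => rfl
  | cons c r =>
    simp [pyCap, PySem.Chars.upper, PySem.Chars.lower, List.map_map, Function.comp,
      pvUpper_upper, pvUpper_lower]

theorem pvLowerL_cap (cs : List Char) :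
    PySem.Chars.lower (pyCap cs) = PySem.Chars.lower cs := by
  cases cs with
  | nil => rfl
  | cons c r =>
    simp [pyCap, PySem.Chars.lower, List.map_map, Function.comp,
      pvLower_upper, pvLower_lower]

theorem pvCap_upperL (cs : List Char) :
    pyCap (PySem.Chars.upper cs) = pyCap cs := by
  cases cs with
  | nil => rfl
  | cons c r =>
    simp [pyCap, PySem.Chars.upper, PySem.Chars.lower, List.map_map, Function.comp,
      pvUpper_upper, pvLower_upper]

theorem pvCap_lowerL (cs : List Char) :
    pyCap (PySem.Chars.lower cs) = pyCap cs := by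
  cases cs with
  | nil => rfl
  | cons c r =>
    simp [pyCap, PySem.Chars.lower, List.map_map, Function.comp, pvUpper_lower, pvLower_lower]

theorem pvCap_cap (cs : List Char) :
    pyCap (pyCap cs) = pyCap cs := by
  cases cs with
  | nil => rfl
  | cons c r =>
    simp [pyCap, pvUpper_upper, pvLowerL_lowerL]

theorem pvStrEq {s t : String} (h : s.toList = t.toList) : s = t := by
  have := congrArg String.ofList h
  simpa using this

-- the three string transforms absorb any previous one of the three
theorem pvApply_comp (n m : Int) (s : String) :
    tvvApply n (tvvApply m s) = tvvApply n s := by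
  unfold tvvApply
  apply pvStrEq
  split_ifs <;>
    simp [PySem.Str.upper, PySem.Str.lower, pyCapStr, pvUpperL_lowerL, pvLowerL_upperL,
      pvUpperL_upperL, pvLowerL_lowerL, pvUpperL_cap, pvLowerL_cap, pvCap_upperL,
      pvCap_lowerL, pvCap_cap]

theorem pvStep (n : Int) (s : String) (ns : List Int) (h : n = 1 ∨ n = 2 ∨ n = 3) :
    tvvLoop s (n :: ns) = tvvLoop (tvvApply n s) ns := by
  rcases h with h | h | h <;> subst h <;> simp [tvvLoop, tvvApply]

theorem pvLoop_valid (ns : List Int) :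
    ∀ s : String, (∀ n ∈ ns, n = 1 ∨ n = 2 ∨ n = 3) →
    tvvLoop s ns = (match ns.getLast? with | none => s | some u => tvvApply u s) := by
  induction ns with
  | nil => intro s _; rfl
  | cons n rest ih =>
    intro s h
    have hn : n = 1 ∨ n = 2 ∨ n = 3 := h n (List.mem_cons_self)
    rw [pvStep n s rest hn, ih (tvvApply n s) (fun m hm => h m (List.mem_cons_of_mem _ hm))]
    cases rest with
    | nil => simp
    | cons m ms =>
      obtain ⟨u, hu⟩ : ∃ u, (m :: ms).getLast? = some u :=
        ⟨(m :: ms).getLast (by simp), List.getLast?_eq_some_getLast (by simp)⟩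
      rw [List.getLast?_cons_cons, hu]
      exact pvApply_comp u n s

theorem pvLoop_invalid (ns : List Int) :
    ∀ s : String, (∃ n ∈ ns, ¬(n = 1 ∨ n = 2 ∨ n = 3)) →
    tvvLoop s ns = "Opción inválida" := by
  induction ns with
  | nil => intro s h; simp at h
  | cons n rest ih =>
    intro s h
    by_cases hn : n = 1 ∨ n = 2 ∨ n = 3
    · rw [pvStep n s rest hn]
      apply ih
      obtain ⟨m, hm, hbad⟩ := h
      rcases List.mem_cons.mp hm with rfl | hm'
      · exact absurd hn hbad
      · exact ⟨m, hm', hbad⟩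
    · push_neg at hn
      simp [tvvLoop, hn.1, hn.2.1, hn.2.2]

-- ===== VERDICT (by name: the statement is the Claim_ definition above) =====
theorem transformar_varias_veces_spec : Claim_equal_transformar_varias_veces := by
  intro texto ns _
  unfold Spec_transformar_varias_veces transformar_varias_veces transformar_varias_veces_alt
  by_cases hv : ∀ n ∈ ns, n = 1 ∨ n = 2 ∨ n = 3
  · rw [if_pos (by simp only [List.all_eq_true, beq_iff_eq, Bool.or_eq_true]; exact fun x hx => or_assoc.mpr (hv x hx))]
    exact pvLoop_valid ns texto hv
  · rw [if_neg (by simp only [List.all_eq_true, beq_iff_eq, Bool.or_eq_true]; exact fun h => hv (fun x hx => or_assoc.mp (h x hx)))]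
    apply pvLoop_invalid
    rcases not_forall.mp hv with ⟨n, hn⟩
    rcases _root_.not_imp.mp hn with ⟨hmem, hbad⟩
    exact ⟨n, hmem, hbad⟩
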